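-- pv_equiv track=rewrite | github.com/banteg/adventofcode | day_14.py | simulate_new
-- ===== SOURCE A (Python) =====
-- from collections import defaultdict
--
-- def simulate(t, d):
--     speed, fly, rest = d
--     cycles, remain = divmod(t, fly + rest)
--     total = (cycles * fly + min(fly, remain)) * speed
--     return total
--
-- def simulate_new(t, deers):
--     scores = defaultdict(int)
--     for i in range(1, t + 1):
--         motion = [simulate(i, deer) for deer in deers]
--         best = max(motion)
--         for ix, sc in enumerate(motion):
--             if sc == best:
--                 scores[ix] += 1
--
--     result = max(scores.values())
--     return result
-- ===== SOURCE B (Python) =====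
-- def simulate_new(t, deers):
--     def dist(i, deer):
--         speed, fly, rest = deer
--         period = fly + rest
--         cycles = i // period
--         remain = i - cycles * period
--         return (cycles * fly + min(fly, remain)) * speed
--
--     seconds = range(1, t + 1)
--     lead = [max(dist(i, deer) for deer in deers) for i in seconds]
--     return max(sum(dist(i, deer) == b for i, b in zip(seconds, lead)) for deer in deers)
-- ===== Notes on version B (the rewrite author's own statement) =====
-- stated objective: alternative
-- what changed: Replaces the per-second defaultdict/enumerate scoring loop by a two-pass formulation: first compute the leading distance for every second, then for each reindeer count the seconds it ties the lead, returning the maximum count; no dict and no per-index bookkeeping.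
import Mathlib
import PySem

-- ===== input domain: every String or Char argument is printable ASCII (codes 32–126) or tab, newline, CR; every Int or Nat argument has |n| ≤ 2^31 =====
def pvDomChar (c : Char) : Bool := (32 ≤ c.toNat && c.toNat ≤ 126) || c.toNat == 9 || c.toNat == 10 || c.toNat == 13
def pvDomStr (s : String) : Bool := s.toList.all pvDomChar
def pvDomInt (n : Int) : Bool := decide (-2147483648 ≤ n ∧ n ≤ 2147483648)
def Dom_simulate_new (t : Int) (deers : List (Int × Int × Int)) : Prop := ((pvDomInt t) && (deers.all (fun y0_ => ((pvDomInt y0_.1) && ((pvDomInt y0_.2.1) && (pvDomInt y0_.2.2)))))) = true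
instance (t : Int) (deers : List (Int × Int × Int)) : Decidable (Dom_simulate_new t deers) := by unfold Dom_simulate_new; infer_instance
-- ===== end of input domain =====

-- B replaces A's per-second defaultdict/enumerate scoring loop by two passes: the per-second
-- leading distance, then per-reindeer counts of lead-tying seconds; an alternative decomposition
-- of the same cost (return values proved equal on Pre_).


-- ===== PORT A =====
def simulate (t : Int) (d : Int × Int × Int) : Int :=
  let speed := d.1
  let fly := d.2.1
  let rest := d.2.2
  let cycles := PySem.Int.floordiv t (fly + rest)
  let remain := PySem.Int.mod t (fly + rest)
  (cycles * fly + min fly remain) * speed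

def simulate_new (t : Int) (deers : List (Int × Int × Int)) : Int :=
  let scores := (PySem.List.pyRange 1 (t + 1) 1).foldl
    (fun scores i =>
      let motion := deers.map (fun deer => simulate i deer)
      let best := (PySem.List.max? motion (fun x => x)).getD 0
      (PySem.List.enumerate motion 0).foldl
        (fun sc p => if p.2 == best then PySem.Dict.modify sc p.1 0 (· + 1) else sc)
        scores)
    PySem.Dict.empty
  (PySem.List.max? (PySem.Dict.values scores) (fun x => x)).getD 0

-- ===== PORT B =====
def distAlt (i : Int) (deer : Int × Int × Int) : Int :=
  let speed := deer.1
  let fly := deer.2.1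
  let rest := deer.2.2
  let period := fly + rest
  let cycles := PySem.Int.floordiv i period
  let remain := i - cycles * period
  (cycles * fly + min fly remain) * speed

def simulate_new_alt (t : Int) (deers : List (Int × Int × Int)) : Int :=
  let seconds := PySem.List.pyRange 1 (t + 1) 1
  let lead := seconds.map (fun i =>
    (PySem.List.max? (deers.map (fun deer => distAlt i deer)) (fun x => x)).getD 0)
  (PySem.List.max? (deers.map (fun deer =>
      ((seconds.zip lead).map (fun p => if distAlt p.1 deer == p.2 then (1 : Int) else 0)).sum))
    (fun x => x)).getD 0

-- ===== PRECONDITION & SPEC =====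
def Pre_simulate_new (t : Int) (deers : List (Int × Int × Int)) : Prop :=
  1 ≤ t ∧ deers ≠ [] ∧ ∀ d ∈ deers, d.2.1 + d.2.2 ≠ 0
instance (t : Int) (deers : List (Int × Int × Int)) : Decidable (Pre_simulate_new t deers) := by
  unfold Pre_simulate_new; infer_instance

def pvWitness_simulate_new : Int × (List (Int × Int × Int)) := (3, [(2, 1, 1), (1, 2, 1)])


def Spec_simulate_new (t : Int) (deers : List (Int × Int × Int)) (out : Int) : Prop :=
  out = simulate_new_alt t deers
instance (t : Int) (deers : List (Int × Int × Int)) (out : Int) : Decidable (Spec_simulate_new t deers out) := by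
  unfold Spec_simulate_new; infer_instance

-- ===== CLAIM =====
def Claim_equal_simulate_new : Prop := ∀ (t : Int) (deers : List (Int × Int × Int)), Dom_simulate_new t deers → Pre_simulate_new t deers → Spec_simulate_new t deers (simulate_new t deers)

-- ===== LEMMAS AND PROOFS =====

theorem simulate_eq_distAlt (i : Int) (d : Int × Int × Int) : simulate i d = distAlt i d := by
  have h := PySem.Int.floordiv_mul_add_mod i (d.2.1 + d.2.2)
  simp only [simulate, distAlt]
  congr 2
  omega

-- A's per-second data
def motA (deers : List (Int × Int × Int)) (i : Int) : List Int := deers.map (fun deer => simulate i deer)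
def bestA (deers : List (Int × Int × Int)) (i : Int) : Int :=
  (PySem.List.max? (motA deers i) (fun x => x)).getD 0

-- A's inner loop, abstracted
def innerStep (b : Int) (d : PySem.Dict Int Int) (ms : List Int) (s : Int) : PySem.Dict Int Int :=
  (PySem.List.enumerate ms s).foldl
    (fun sc p => if p.2 == b then PySem.Dict.modify sc p.1 0 (· + 1) else sc) d

-- A's outer loop, abstracted
def aStep (deers : List (Int × Int × Int)) (scores : PySem.Dict Int Int) (i : Int) : PySem.Dict Int Int :=
  innerStep (bestA deers i) scores (motA deers i) 0

theorem simulate_new_eq_aStep (t : Int) (deers : List (Int × Int × Int)) :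
    simulate_new t deers =
      (PySem.List.max? ((PySem.List.pyRange 1 (t + 1) 1).foldl (aStep deers) PySem.Dict.empty).values (fun x => x)).getD 0 := rfl

-- "index j scores a point at second i" (the literal condition of the innerStep lemmas at s = 0)
def hitB (deers : List (Int × Int × Int)) (j i : Int) : Bool :=
  decide ((0 : Int) ≤ j ∧ j < 0 + ((motA deers i).length : Int) ∧ (motA deers i).getD (j - 0).toNat 0 = bestA deers i)

theorem innerStep_getD (ms : List Int) (b : Int) (s : Int) (d : PySem.Dict Int Int) (j : Int) :
    (innerStep b d ms s).getD j 0 =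
      d.getD j 0 + (if s ≤ j ∧ j < s + ms.length ∧ ms.getD (j - s).toNat 0 = b then 1 else 0) := by
  induction ms generalizing s d with
  | nil =>
    have hC : ¬ (s ≤ j ∧ j < s + (([] : List Int).length : Int) ∧ ([] : List Int).getD (j - s).toNat 0 = b) := by
      rintro ⟨h1, h2, _⟩; simp only [List.length_nil, Nat.cast_zero] at h2; omega
    rw [innerStep, PySem.List.enumerate_nil, List.foldl_nil, if_neg hC, add_zero]
  | cons x xs ih =>
    rw [innerStep, PySem.List.enumerate_cons, List.foldl_cons]
    have hrec := ih (s + 1) (if x == b then PySem.Dict.modify d s 0 (· + 1) else d)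
    rw [show ((PySem.List.enumerate xs (s+1)).foldl
        (fun sc p => if p.2 == b then PySem.Dict.modify sc p.1 0 (· + 1) else sc)
        (if x == b then PySem.Dict.modify d s 0 (· + 1) else d)) = innerStep b (if x == b then PySem.Dict.modify d s 0 (· + 1) else d) xs (s+1) from rfl]
    rw [hrec]
    by_cases hj : j = s
    · subst hj
      have hC2 : ¬ (j + 1 ≤ j ∧ j < j + 1 + (xs.length : Int) ∧ xs.getD (j - (j+1)).toNat 0 = b) := by
        rintro ⟨h1, _, _⟩; omega
      rw [if_neg hC2, add_zero]
      by_cases hx : x = b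
      · have hxb : (x == b) = true := by simpa using hx
        rw [if_pos hxb, PySem.Dict.getD_modify_self]
        have hC : (j ≤ j ∧ j < j + ((x :: xs).length : Int) ∧ (x :: xs).getD (j - j).toNat 0 = b) := by
          refine ⟨le_refl _, by simp only [List.length_cons]; push_cast; omega, ?_⟩
          rw [show (j - j).toNat = 0 from by omega, List.getD_cons_zero]; exact hx
        rw [if_pos hC]
      · have hxb : (x == b) = false := by simpa using hx
        rw [if_neg (by simp [hxb])]
        have hC : ¬ (j ≤ j ∧ j < j + ((x :: xs).length : Int) ∧ (x :: xs).getD (j - j).toNat 0 = b) := by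
          rintro ⟨_, _, h3⟩
          rw [show (j - j).toNat = 0 from by omega, List.getD_cons_zero] at h3
          exact hx h3
        rw [if_neg hC, add_zero]
    · have hd : (if x == b then PySem.Dict.modify d s 0 (· + 1) else d).getD j 0 = d.getD j 0 := by
        split
        · exact PySem.Dict.getD_modify_of_ne d 0 _ hj
        · rfl
      rw [hd]
      congr 1
      by_cases hle : s + 1 ≤ j
      · have h2 : (x :: xs).getD (j - s).toNat 0 = xs.getD (j - (s+1)).toNat 0 := by
          rw [show (j - s).toNat = (j - (s+1)).toNat + 1 from by omega, List.getD_cons_succ]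
        have hiff : (s + 1 ≤ j ∧ j < s + 1 + (xs.length : Int) ∧ xs.getD (j - (s+1)).toNat 0 = b)
            ↔ (s ≤ j ∧ j < s + ((x :: xs).length : Int) ∧ (x :: xs).getD (j - s).toNat 0 = b) := by
          rw [h2]; simp only [List.length_cons]
          constructor
          · rintro ⟨a1, a2, a3⟩; refine ⟨by omega, by push_cast at a2 ⊢; omega, a3⟩
          · rintro ⟨a1, a2, a3⟩; refine ⟨hle, by push_cast at a2 ⊢; omega, a3⟩
        exact if_congr hiff rfl rfl
      · have hC1 : ¬ (s + 1 ≤ j ∧ j < s + 1 + (xs.length : Int) ∧ xs.getD (j - (s+1)).toNat 0 = b) := by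
          rintro ⟨a1, _, _⟩; omega
        have hC : ¬ (s ≤ j ∧ j < s + ((x :: xs).length : Int) ∧ (x :: xs).getD (j - s).toNat 0 = b) := by
          rintro ⟨a1, _, _⟩; exact hj (by omega)
        rw [if_neg hC1, if_neg hC]

theorem innerStep_contains (ms : List Int) (b : Int) (s : Int) (d : PySem.Dict Int Int) (j : Int) :
    (innerStep b d ms s).contains j =
      (d.contains j || decide (s ≤ j ∧ j < s + (ms.length : Int) ∧ ms.getD (j - s).toNat 0 = b)) := by
  induction ms generalizing s d with
  | nil =>
    have hC : ¬ (s ≤ j ∧ j < s + (([] : List Int).length : Int) ∧ ([] : List Int).getD (j - s).toNat 0 = b) := by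
      rintro ⟨h1, h2, _⟩; simp only [List.length_nil, Nat.cast_zero] at h2; omega
    rw [innerStep, PySem.List.enumerate_nil, List.foldl_nil, decide_eq_false hC, Bool.or_false]
  | cons x xs ih =>
    rw [innerStep, PySem.List.enumerate_cons, List.foldl_cons]
    have hrec := ih (s + 1) (if x == b then PySem.Dict.modify d s 0 (· + 1) else d)
    rw [show ((PySem.List.enumerate xs (s+1)).foldl
        (fun sc p => if p.2 == b then PySem.Dict.modify sc p.1 0 (· + 1) else sc)
        (if x == b then PySem.Dict.modify d s 0 (· + 1) else d)) = innerStep b (if x == b then PySem.Dict.modify d s 0 (· + 1) else d) xs (s+1) from rfl]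
    rw [hrec]
    have hd : (if x == b then PySem.Dict.modify d s 0 (· + 1) else d).contains j =
        (d.contains j || decide (j = s ∧ x = b)) := by
      by_cases hx : x = b
      · have hxb : (x == b) = true := by simpa using hx
        rw [if_pos hxb, PySem.Dict.contains_modify]
        by_cases hj : j = s <;> simp [hj, hx, Bool.or_comm]
      · have hxb : (x == b) = false := by simpa using hx
        rw [if_neg (by simp [hxb])]
        simp [hx]
    rw [hd]
    have hiff : ((j = s ∧ x = b) ∨ (s + 1 ≤ j ∧ j < s + 1 + (xs.length : Int) ∧ xs.getD (j - (s+1)).toNat 0 = b))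
        ↔ (s ≤ j ∧ j < s + ((x :: xs).length : Int) ∧ (x :: xs).getD (j - s).toNat 0 = b) := by
      constructor
      · rintro (⟨a1, a2⟩ | ⟨a1, a2, a3⟩)
        · subst a1
          refine ⟨le_refl _, by simp only [List.length_cons]; push_cast; omega, ?_⟩
          rw [show (j - j).toNat = 0 from by omega, List.getD_cons_zero]; exact a2
        · refine ⟨by omega, by simp only [List.length_cons]; push_cast; omega, ?_⟩
          rw [show (j - s).toNat = (j - (s+1)).toNat + 1 from by omega, List.getD_cons_succ]; exact a3
      · rintro ⟨a1, a2, a3⟩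
        by_cases hj : j = s
        · subst hj; left
          rw [show (j - j).toNat = 0 from by omega, List.getD_cons_zero] at a3
          exact ⟨rfl, a3⟩
        · right
          rw [show (j - s).toNat = (j - (s+1)).toNat + 1 from by omega, List.getD_cons_succ] at a3
          simp only [List.length_cons] at a2
          refine ⟨by omega, by push_cast at a2 ⊢; omega, a3⟩
    rw [Bool.or_assoc]
    congr 1
    rw [show ∀ p q : Prop, ∀ _ : Decidable p, ∀ _ : Decidable q, (decide p || decide q) = decide (p ∨ q) from by intros p q ip iq; by_cases hp : p <;> by_cases hq : q <;> simp [hp, hq]]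
    exact decide_eq_decide.mpr hiff

theorem innerStep_nodup (ms : List Int) (b : Int) (s : Int) (d : PySem.Dict Int Int)
    (h : d.keys.Nodup) : (innerStep b d ms s).keys.Nodup := by
  induction ms generalizing s d with
  | nil => simpa [innerStep, PySem.List.enumerate_nil] using h
  | cons x xs ih =>
    rw [innerStep, PySem.List.enumerate_cons, List.foldl_cons]
    apply ih (s + 1)
    split
    · rw [PySem.Dict.keys_modify]
      exact PySem.Dict.nodup_keys_insert d s _ h
    · exact h


theorem outer_getD (deers : List (Int × Int × Int)) (is : List Int) (d : PySem.Dict Int Int) (j : Int) :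
    (is.foldl (aStep deers) d).getD j 0 = d.getD j 0 + (is.countP (hitB deers j) : Int) := by
  induction is generalizing d with
  | nil => simp
  | cons i rest ih =>
    rw [List.foldl_cons, ih, List.countP_cons]
    have hstep : (aStep deers d i).getD j 0 = d.getD j 0 + (if hitB deers j i = true then 1 else 0) := by
      rw [aStep, innerStep_getD]
      congr 1
      simp only [hitB, decide_eq_true_eq]
    rw [hstep]
    by_cases hb : hitB deers j i = true
    · simp only [if_pos hb]
      push_cast
      ring
    · simp only [if_neg hb]
      push_cast
      ring

theorem outer_contains (deers : List (Int × Int × Int)) (is : List Int) (d : PySem.Dict Int Int) (j : Int) :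
    (is.foldl (aStep deers) d).contains j = (d.contains j || decide (0 < is.countP (hitB deers j))) := by
  induction is generalizing d with
  | nil => simp
  | cons i rest ih =>
    rw [List.foldl_cons, ih, List.countP_cons]
    have hstep : (aStep deers d i).contains j = (d.contains j || hitB deers j i) := by
      rw [aStep, innerStep_contains]
      rfl
    rw [hstep, Bool.or_assoc]
    congr 1
    by_cases hb : hitB deers j i = true
    · rw [hb, Bool.true_or, if_pos rfl]
      symm
      rw [decide_eq_true_eq]
      omega
    · have hb' : hitB deers j i = false := by simpa using hb
      rw [if_neg hb, Nat.add_zero, hb', Bool.false_or]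

theorem outer_nodup (deers : List (Int × Int × Int)) (is : List Int) (d : PySem.Dict Int Int)
    (h : d.keys.Nodup) : (is.foldl (aStep deers) d).keys.Nodup := by
  induction is generalizing d with
  | nil => exact h
  | cons i rest ih => exact ih _ (innerStep_nodup _ _ _ _ h)

-- B's per-deer count of lead-tying seconds
def cntB (t : Int) (deers : List (Int × Int × Int)) (deer : Int × Int × Int) : Nat :=
  (PySem.List.pyRange 1 (t + 1) 1).countP (fun i => distAlt i deer == bestA deers i)

theorem bestAlt_eq (deers : List (Int × Int × Int)) (i : Int) :
    (PySem.List.max? (deers.map (fun deer => distAlt i deer)) (fun x => x)).getD 0 = bestA deers i := by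
  rw [bestA, motA, List.map_congr_left (fun d _ => (simulate_eq_distAlt i d))]

theorem alt_eq_max_cntB (t : Int) (deers : List (Int × Int × Int)) :
    simulate_new_alt t deers =
      (PySem.List.max? (deers.map (fun deer => (cntB t deers deer : Int))) (fun x => x)).getD 0 := by
  rw [simulate_new_alt]
  congr 2
  apply List.map_congr_left
  intro deer _
  rw [Eq.symm List.map_prod_left_eq_zip, List.map_map]
  have : ((fun p : Int × Int => if distAlt p.1 deer == p.2 then (1:Int) else 0) ∘
      (fun a => (a, (PySem.List.max? (deers.map (fun deer => distAlt a deer)) (fun x => x)).getD 0)))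
      = fun i => if (distAlt i deer == bestA deers i) = true then (1:Int) else 0 := by
    funext i
    simp only [Function.comp, bestAlt_eq]
  rw [this, PySem.List.sum_map_ite_one_zero, cntB]

-- the two counts agree: index j of deers scores iff deers[j] ties the lead
theorem hitB_eq_cnt (deers : List (Int × Int × Int)) (k : Nat) (hk : k < deers.length) (i : Int) :
    hitB deers (k : Int) i = (distAlt i deers[k] == bestA deers i) := by
  have hlen : (motA deers i).length = deers.length := by simp [motA]
  have hget : (motA deers i).getD ((k : Int) - 0).toNat 0 = distAlt i deers[k] := by
    rw [show ((k : Int) - 0).toNat = k from by omega,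
      List.getD_eq_getElem _ _ (by omega : k < (motA deers i).length)]
    simp [motA, simulate_eq_distAlt]
  simp only [hitB, hget, hlen]
  by_cases h : distAlt i deers[k] = bestA deers i
  · simp [h]; omega
  · simp [h]

-- ===== VERDICT =====
theorem simulate_new_spec : Claim_equal_simulate_new := by
  intro t deers _ hpre
  obtain ⟨ht, hne, _⟩ := hpre
  unfold Spec_simulate_new
  rw [alt_eq_max_cntB, simulate_new_eq_aStep]
  set secs := PySem.List.pyRange 1 (t + 1) 1 with hsecs
  set counts := deers.map (fun deer => (cntB t deers deer : Int)) with hcounts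
  set D := secs.foldl (aStep deers) PySem.Dict.empty with hD
  have hnodup : D.keys.Nodup := outer_nodup deers secs _ PySem.Dict.nodup_keys_empty
  have hgetD : ∀ j : Int, D.getD j 0 = (secs.countP (hitB deers j) : Int) := by
    intro j; rw [hD, outer_getD, PySem.Dict.getD_empty, zero_add]
  have hcont : ∀ j : Int, D.contains j = decide (0 < secs.countP (hitB deers j)) := by
    intro j; rw [hD, outer_contains, PySem.Dict.contains_empty, Bool.false_or]
  -- B's maximum
  have hcne : counts ≠ [] := by simp [hcounts, hne]
  obtain ⟨M, hM⟩ : ∃ M, PySem.List.max? counts (fun x => x) = some M := by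
    cases h : PySem.List.max? counts (fun x => x) with
    | none => exact absurd (by rwa [PySem.List.max?_eq_none_iff] at h) hcne
    | some m => exact ⟨m, rfl⟩
  have hMmem : M ∈ counts := PySem.List.max?_mem hM
  have hMub : ∀ y ∈ counts, y ≤ M := PySem.List.max?_isMax hM
  -- some index scores at second 1
  have h1secs : (1 : Int) ∈ secs := by rw [hsecs]; exact PySem.List.mem_pyRange_one.mpr ⟨le_refl _, by omega⟩
  obtain ⟨k0, hk0, hbest0⟩ : ∃ k0, ∃ h : k0 < deers.length, distAlt 1 deers[k0] = bestA deers 1 := by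
    have hmne : motA deers 1 ≠ [] := by simp [motA, hne]
    obtain ⟨m, hm⟩ : ∃ m, PySem.List.max? (motA deers 1) (fun x => x) = some m := by
      cases h : PySem.List.max? (motA deers 1) (fun x => x) with
      | none => exact absurd (by rwa [PySem.List.max?_eq_none_iff] at h) hmne
      | some m => exact ⟨m, rfl⟩
    have hbm : bestA deers 1 = m := by rw [bestA, hm]; rfl
    have : m ∈ motA deers 1 := PySem.List.max?_mem hm
    rw [motA] at this
    obtain ⟨deer, hdeer, hd⟩ := List.mem_map.mp this
    obtain ⟨k0, hk0, hk0d⟩ := List.mem_iff_getElem.mp hdeer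
    exact ⟨k0, hk0, by rw [hk0d, hbm, ← hd, simulate_eq_distAlt]⟩
  have hcnt0 : 0 < cntB t deers deers[k0] := by
    rw [cntB]
    exact List.countP_pos_iff.mpr ⟨1, h1secs, by simp [hbest0]⟩
  have hM1 : 1 ≤ M := by
    have : (cntB t deers deers[k0] : Int) ∈ counts := by
      rw [hcounts]; exact List.mem_map.mpr ⟨deers[k0], List.getElem_mem hk0, rfl⟩
    have := hMub _ this
    omega
  -- the dict's values are exactly (some of) the counts, and M is among them
  have hvalne : ∃ v, v ∈ D.values := by
    have hc : D.contains ((k0 : Nat) : Int) = true := by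
      rw [hcont]
      have : secs.countP (hitB deers (k0 : Int)) = cntB t deers deers[k0] := by
        rw [cntB]; exact List.countP_congr (fun i _ => by rw [hitB_eq_cnt deers k0 hk0 i])
      simp [this]; omega
    have hk : ((k0 : Nat) : Int) ∈ D.keys := (PySem.Dict.contains_iff_mem_keys D _).mp hc
    obtain ⟨p, hp, hp1⟩ := List.mem_map.mp (by simpa only [PySem.Dict.keys] using hk)
    exact ⟨p.2, List.mem_map.mpr ⟨p, hp, rfl⟩⟩
  obtain ⟨v0, hv0⟩ := hvalne
  have hvne : D.values ≠ [] := fun h => by rw [h] at hv0; cases hv0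
  obtain ⟨mA, hmA⟩ : ∃ m, PySem.List.max? D.values (fun x => x) = some m := by
    cases h : PySem.List.max? D.values (fun x => x) with
    | none => exact absurd (by rwa [PySem.List.max?_eq_none_iff] at h) hvne
    | some m => exact ⟨m, rfl⟩
  -- every dict value is one of B's per-deer counts
  have hval_in_counts : ∀ v ∈ D.values, v ∈ counts := by
    intro v hv
    obtain ⟨p, hp, hp2⟩ := List.mem_map.mp (by simpa only [PySem.Dict.values] using hv)
    have hp' : (p.1, p.2) ∈ D.items := by simpa using hp
    have hgd : D.getD p.1 0 = p.2 := PySem.Dict.getD_of_mem_items D hp' hnodup 0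
    have hkmem : p.1 ∈ D.keys := PySem.Dict.mem_keys_of_mem_items D hp
    have hcontk : D.contains p.1 = true := (PySem.Dict.contains_iff_mem_keys D _).mpr hkmem
    rw [hcont] at hcontk
    have hpos : 0 < secs.countP (hitB deers p.1) := by simpa using hcontk
    obtain ⟨i, _, hhit⟩ := List.countP_pos_iff.mp hpos
    have hbnd : (0 : Int) ≤ p.1 ∧ p.1 < 0 + ((motA deers i).length : Int) := by
      have := of_decide_eq_true hhit
      exact ⟨this.1, this.2.1⟩
    have hlen : (motA deers i).length = deers.length := by simp [motA]
    obtain ⟨k, hk⟩ : ∃ k : Nat, p.1 = (k : Int) := ⟨p.1.toNat, by omega⟩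
    have hk1 : k < deers.length := by omega
    have hc : secs.countP (hitB deers p.1) = cntB t deers deers[k] := by
      rw [hk, cntB]
      exact List.countP_congr (fun i' _ => by rw [hitB_eq_cnt deers k hk1 i'])
    have hv2 : v = (cntB t deers deers[k] : Int) := by
      rw [← hp2, ← hgd, hgetD, hc]
    rw [hcounts, hv2]
    exact List.mem_map.mpr ⟨deers[k], List.getElem_mem hk1, rfl⟩
  have hmA_le : mA ≤ M := hMub _ (hval_in_counts mA (PySem.List.max?_mem hmA))
  -- conversely, M is one of the dict's values
  have hM_mem_values : M ∈ D.values := by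
    obtain ⟨deer, hdeer, hdM⟩ := List.mem_map.mp (by rw [hcounts] at hMmem; exact hMmem)
    obtain ⟨k1, hk1, rfl⟩ := List.mem_iff_getElem.mp hdeer
    have hdM' : (cntB t deers deers[k1] : Int) = M := hdM
    have hc : secs.countP (hitB deers (k1 : Int)) = cntB t deers deers[k1] := by
      rw [cntB]
      exact List.countP_congr (fun i' _ => by rw [hitB_eq_cnt deers k1 hk1 i'])
    have hcontk : D.contains ((k1 : Nat) : Int) = true := by
      rw [hcont, hc]
      simp only [decide_eq_true_eq]
      omega
    have hkmem : ((k1 : Nat) : Int) ∈ D.keys := (PySem.Dict.contains_iff_mem_keys D _).mp hcontk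
    obtain ⟨p, hp, hp1⟩ := List.mem_map.mp (by simpa only [PySem.Dict.keys] using hkmem)
    have hp' : (p.1, p.2) ∈ D.items := by simpa using hp
    have hgd : D.getD p.1 0 = p.2 := PySem.Dict.getD_of_mem_items D hp' hnodup 0
    have hp2M : p.2 = M := by
      rw [← hgd, hp1, hgetD, hc, hdM']
    exact List.mem_map.mpr ⟨p, hp, hp2M⟩
  have hM_le : M ≤ mA := PySem.List.max?_isMax hmA M hM_mem_values
  rw [hmA, hM]
  simp only [Option.getD_some]
  omega
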